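-- pv_equiv track=rewrite | github.com/OverKrice3000/EFPythonTasks | boxInBoxes/main.py | get_roof_list
-- ===== SOURCE A (Python) =====
-- from typing import List, TypeVar
--
-- def get_box_width(size: int) -> int:
--     return 3 if size == 1 else 2 + get_box_width(size - 1)
--
-- def get_roof_list(size: int) -> List[str]:
--     str_len = get_box_width(size)
--     roof_list = []
--     for i in range(0, str_len):
--         if i % 2 == 0:
--             roof_list.append(" ")
--         else:
--             roof_list.append("_")
--     return roof_list
-- ===== SOURCE B (Python) =====
-- def get_roof_list(size: int):
--     if size == 1:
--         return [" ", "_", " "]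
--     return get_roof_list(size - 1) + ["_", " "]
-- ===== Notes on version B (the rewrite author's own statement) =====
-- stated objective: alternative
-- what changed: Replaces the two-stage compute-width-then-index-loop-with-modulo by a single direct structural recursion on size: roof(1) = [' ','_',' '] and roof(n) = roof(n-1) + ['_',' ']; no get_box_width, no range loop, no parity branch. Trades the index loop for clarity; repeated list concatenation makes it asymptotically slower.
import Mathlib
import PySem

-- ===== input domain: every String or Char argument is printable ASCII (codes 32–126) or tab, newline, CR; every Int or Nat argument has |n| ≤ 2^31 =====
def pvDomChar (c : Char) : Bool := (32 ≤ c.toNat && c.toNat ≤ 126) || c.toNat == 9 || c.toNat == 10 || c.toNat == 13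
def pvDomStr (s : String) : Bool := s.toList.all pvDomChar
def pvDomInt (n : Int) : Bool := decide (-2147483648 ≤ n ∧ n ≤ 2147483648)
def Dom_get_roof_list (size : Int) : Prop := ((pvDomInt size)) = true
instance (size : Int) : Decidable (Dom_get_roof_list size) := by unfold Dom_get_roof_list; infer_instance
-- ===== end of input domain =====

-- B replaces width computation + index loop with modulo branch by one direct
-- structural recursion on size (objective: simpler).

-- ===== PORT A =====
-- get_box_width: the totality guard `size ≤ 1` only makes the recursion terminate;
-- Python diverges (RecursionError) for size ≤ 0, which Pre_get_roof_list excludes.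
def get_box_width (size : Int) : Int :=
  if size ≤ 1 then 3 else 2 + get_box_width (size - 1)
termination_by size.toNat
decreasing_by omega

def get_roof_list (size : Int) : List String :=
  let str_len := get_box_width size
  (PySem.List.pyRange 0 str_len 1).foldl
    (fun roof_list i => roof_list ++ [if PySem.Int.mod i 2 == 0 then " " else "_"]) []

-- ===== PORT B =====
-- The `size ≤ 1` guard (vs Python's `size == 1`) only makes the recursion
-- terminate; Python diverges for size ≤ 0, excluded by Pre_get_roof_list.
def get_roof_list_alt (size : Int) : List String :=
  if size ≤ 1 then [" ", "_", " "]
  else get_roof_list_alt (size - 1) ++ ["_", " "]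
termination_by size.toNat
decreasing_by omega

-- ===== PRECONDITION & SPEC =====
-- Pre_ excludes size ≤ 0, on which both A and B raise RecursionError.
def Pre_get_roof_list (size : Int) : Prop := 1 ≤ size
instance (size : Int) : Decidable (Pre_get_roof_list size) := by unfold Pre_get_roof_list; infer_instance
def pvWitness_get_roof_list : Int := (3)
def Spec_get_roof_list (size : Int) (out : List String) : Prop := out = get_roof_list_alt size
instance (size : Int) (out : List String) : Decidable (Spec_get_roof_list size out) := by unfold Spec_get_roof_list; infer_instance

-- ===== CLAIM =====
def Claim_equal_get_roof_list : Prop := ∀ (size : Int), Dom_get_roof_list size → Pre_get_roof_list size → Spec_get_roof_list size (get_roof_list size)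

-- ===== LEMMAS AND PROOFS =====

def pvRoofCell (k : Nat) : String := if k % 2 == 0 then " " else "_"

theorem gbw_val (size : Int) : 1 ≤ size → get_box_width size = 2 * size + 1 := by
  induction size using get_box_width.induct with
  | case1 s hle =>
    intro h
    rw [get_box_width, if_pos hle]
    omega
  | case2 s hgt ih =>
    intro h
    rw [get_box_width, if_neg hgt, ih (by omega)]
    ring

theorem roofA_eq (n : Nat) :
    (PySem.List.pyRange 0 (n : Int) 1).foldl
      (fun roof_list i => roof_list ++ [if PySem.Int.mod i 2 == 0 then " " else "_"]) []
      = (List.range n).map pvRoofCell := by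
  rw [PySem.List.foldl_append_singleton_eq_map, PySem.List.pyRange_one, List.map_map]
  simp only [Int.sub_zero, Int.toNat_natCast]
  refine List.map_congr_left (fun k hk => ?_)
  simp only [Function.comp, PySem.Int.mod, pvRoofCell, Int.zero_add]
  have hf : ((k : Int)).fmod 2 = (k : Int) % 2 := by
    rw [Int.fmod_eq_emod_of_nonneg _ (by norm_num)]
  rw [hf]
  by_cases h : k % 2 = 0
  · have h' : (k : Int) % 2 = 0 := by omega
    simp [h, h']
  · have h' : ¬ ((k : Int) % 2 = 0) := by omega
    simp [h, h']

theorem roof_step (m : Nat) :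
    (List.range (2 * m + 3)).map pvRoofCell
      = (List.range (2 * m + 1)).map pvRoofCell ++ ["_", " "] := by
  rw [show 2 * m + 3 = (2 * m + 1) + 1 + 1 from rfl, List.range_succ, List.range_succ,
      List.map_append, List.map_append, List.append_assoc]
  simp [pvRoofCell, Nat.add_mod, Nat.mul_mod_right]

theorem roofB_eq (size : Int) :
    1 ≤ size → get_roof_list_alt size = (List.range (2 * size + 1).toNat).map pvRoofCell := by
  induction size using get_roof_list_alt.induct with
  | case1 s hle =>
    intro h
    have hs : s = 1 := by omega
    subst hs
    rw [get_roof_list_alt, if_pos hle]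
    decide
  | case2 s hgt ih =>
    intro h
    have hih := ih (show (1:Int) ≤ s - 1 by omega)
    rw [get_roof_list_alt, if_neg hgt, hih]
    have h1 : (2 * (s - 1) + 1).toNat = 2 * (s - 1).toNat + 1 := by
      simp only [two_mul]; omega
    have h2 : (2 * s + 1).toNat = 2 * (s - 1).toNat + 3 := by
      simp only [two_mul]; omega
    rw [h1, h2, roof_step]

-- ===== VERDICT =====
theorem get_roof_list_spec : Claim_equal_get_roof_list := by
  intro size _ hpre
  have hpre' : 1 ≤ size := hpre
  unfold Spec_get_roof_list get_roof_list
  rw [gbw_val size hpre', roofB_eq size hpre']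
  have hc : (2 * size + 1 : Int) = (((2 * size + 1).toNat : Nat) : Int) := by
    simp only [two_mul]; omega
  rw [hc, roofA_eq, Int.toNat_natCast]
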